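-- pv_equiv track=rewrite | github.com/perom7/researchassistant | offline_research_assistant/ppt.py | _derive_deck_sections
-- ===== SOURCE A (Python) =====
-- from typing import Dict, List, Sequence, Tuple
--
-- def _derive_deck_sections(summary_sents: List[str]) -> Dict[str, List[str]]:
--     buckets = {
--         "Problem & Motivation": [],
--         "Key Contributions": [],
--         "Method Overview": [],
--         "Experimental Setup": [],
--         "Results & Findings": [],
--         "Limitations": [],
--         "Future Work": [],
--         "Conclusion": [],
--     }
--
--     for s in summary_sents:
--         low = s.lower()
--         if any(k in low for k in ["we propose", "we present", "we introduce", "we develop", "our method", "our approach", "framework"]):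
--             buckets["Key Contributions"].append(s)
--             buckets["Method Overview"].append(s)
--         elif any(k in low for k in ["dataset", "datasets", "benchmark", "evaluation", "evaluate", "experiment", "experiments", "ablation", "baseline"]):
--             buckets["Experimental Setup"].append(s)
--         elif any(k in low for k in ["result", "results", "outperform", "improve", "improves", "accuracy", "f1", "auc", "precision", "recall", "error", "gain"]):
--             buckets["Results & Findings"].append(s)
--         elif any(k in low for k in ["limitation", "limitations", "however", "constraint", "trade-off", "threat", "threats"]):
--             buckets["Limitations"].append(s)
--         elif any(k in low for k in ["future work", "future", "next", "further", "extension", "extend"]):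
--             buckets["Future Work"].append(s)
--         elif any(k in low for k in ["in summary", "overall", "we conclude", "conclude", "conclusion"]):
--             buckets["Conclusion"].append(s)
--         else:
--             buckets["Problem & Motivation"].append(s)
--
--     # De-duplicate while preserving order
--     for k, vals in list(buckets.items()):
--         seen = set()
--         out: List[str] = []
--         for v in vals:
--             key = v.strip()
--             if not key or key in seen:
--                 continue
--             seen.add(key)
--             out.append(v)
--         buckets[k] = out
--     return buckets
-- ===== SOURCE B (Python) =====
-- # Bucket-major two-stage version: tag every sentence once with its target buckets,
-- # then build each section independently by filtering the tagged list and collapsing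
-- # duplicates through a dict of first representatives (stripped key -> first sentence)
-- # whose values, in insertion order, are the section.
--
-- _ORDER = [
--     "Problem & Motivation", "Key Contributions", "Method Overview",
--     "Experimental Setup", "Results & Findings", "Limitations",
--     "Future Work", "Conclusion",
-- ]
--
-- _RULES = [
--     (("we propose", "we present", "we introduce", "we develop", "our method", "our approach", "framework"),
--      ("Key Contributions", "Method Overview")),
--     (("dataset", "datasets", "benchmark", "evaluation", "evaluate", "experiment", "experiments", "ablation", "baseline"),
--      ("Experimental Setup",)),
--     (("result", "results", "outperform", "improve", "improves", "accuracy", "f1", "auc", "precision", "recall", "error", "gain"),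
--      ("Results & Findings",)),
--     (("limitation", "limitations", "however", "constraint", "trade-off", "threat", "threats"),
--      ("Limitations",)),
--     (("future work", "future", "next", "further", "extension", "extend"),
--      ("Future Work",)),
--     (("in summary", "overall", "we conclude", "conclude", "conclusion"),
--      ("Conclusion",)),
-- ]
--
--
-- def _targets(s):
--     low = s.lower()
--     for kws, names in _RULES:
--         if any(k in low for k in kws):
--             return names
--     return ("Problem & Motivation",)
--
--
-- def _first_occurrences(vals):
--     # dict of first representatives: key = stripped sentence, value = the first
--     # original sentence with that key; dict order gives the output order
--     rep = {}
--     for v in vals: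
--         key = v.strip()
--         if key:
--             rep.setdefault(key, v)
--     return list(rep.values())
--
--
-- def _derive_deck_sections(summary_sents):
--     tagged = [(s, _targets(s)) for s in summary_sents]
--     return {name: _first_occurrences([s for s, t in tagged if name in t])
--             for name in _ORDER}
-- ===== Notes on version B (the rewrite author's own statement) =====
-- stated objective: alternative
-- what changed: Replaces A's sentence-major if/elif accumulation plus per-bucket seen-set dedup with a bucket-major construction: sentences are tagged once with their target buckets, then each section is built independently by filtering the tagged list and collapsing duplicates through a dict of first representatives (stripped key -> first sentence) whose insertion-order values are the section.
import Mathlib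
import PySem

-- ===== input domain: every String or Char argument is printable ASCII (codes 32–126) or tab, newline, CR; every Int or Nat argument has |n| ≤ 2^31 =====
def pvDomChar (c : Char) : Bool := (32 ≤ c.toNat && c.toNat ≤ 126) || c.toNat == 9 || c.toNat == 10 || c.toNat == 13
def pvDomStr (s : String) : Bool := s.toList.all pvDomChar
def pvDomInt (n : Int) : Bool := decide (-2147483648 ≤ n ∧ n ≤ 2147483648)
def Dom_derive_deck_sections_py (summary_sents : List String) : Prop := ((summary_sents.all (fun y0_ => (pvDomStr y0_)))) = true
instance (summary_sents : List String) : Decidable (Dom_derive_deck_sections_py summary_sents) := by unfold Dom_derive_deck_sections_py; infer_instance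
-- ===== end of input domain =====

-- B is bucket-major: tag each sentence once with its target buckets, then build each
-- section independently by filtering the tagged list and collapsing duplicates through a
-- dict of first representatives (stripped key -> first sentence) whose insertion-order
-- values are the section, instead of A's sentence-major if/elif accumulation plus
-- seen-set dedup (objective: alternative).

-- Shared keyword constants (pure data used by both ports).
def kwContrib : List String := ["we propose", "we present", "we introduce", "we develop", "our method", "our approach", "framework"]
def kwExp : List String := ["dataset", "datasets", "benchmark", "evaluation", "evaluate", "experiment", "experiments", "ablation", "baseline"]
def kwRes : List String := ["result", "results", "outperform", "improve", "improves", "accuracy", "f1", "auc", "precision", "recall", "error", "gain"]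
def kwLim : List String := ["limitation", "limitations", "however", "constraint", "trade-off", "threat", "threats"]
def kwFut : List String := ["future work", "future", "next", "further", "extension", "extend"]
def kwConc : List String := ["in summary", "overall", "we conclude", "conclude", "conclusion"]

-- ===== PORT A =====
-- A's dict has eight fixed literal keys, so it is modelled as a record whose fields are
-- the buckets in the dict's insertion order; the result lists them in that order.
structure BucketsA where
  pm : List String
  kc : List String
  mo : List String
  es : List String
  rfi : List String
  li : List String
  fw : List String
  co : List String
deriving Repr, DecidableEq

def stepA (b : BucketsA) (s : String) : BucketsA :=
  let low := PySem.Str.lower s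
  if kwContrib.any (fun k => PySem.Str.isIn k low) then
    { b with kc := b.kc ++ [s], mo := b.mo ++ [s] }
  else if kwExp.any (fun k => PySem.Str.isIn k low) then
    { b with es := b.es ++ [s] }
  else if kwRes.any (fun k => PySem.Str.isIn k low) then
    { b with rfi := b.rfi ++ [s] }
  else if kwLim.any (fun k => PySem.Str.isIn k low) then
    { b with li := b.li ++ [s] }
  else if kwFut.any (fun k => PySem.Str.isIn k low) then
    { b with fw := b.fw ++ [s] }
  else if kwConc.any (fun k => PySem.Str.isIn k low) then
    { b with co := b.co ++ [s] }
  else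
    { b with pm := b.pm ++ [s] }

-- A's second phase, the dedup loop: state = (seen set, out list)
def dedupStepA (st : PySem.Set String × List String) (v : String) : PySem.Set String × List String :=
  let key := PySem.Str.strip v
  if key == "" || PySem.Set.contains st.1 key then st
  else (PySem.Set.add st.1 key, st.2 ++ [v])

def dedupA (vals : List String) : List String :=
  (vals.foldl dedupStepA (PySem.Set.empty, [])).2

def derive_deck_sections_py (summary_sents : List String) : List (String × List String) :=
  let b := summary_sents.foldl stepA ⟨[], [], [], [], [], [], [], []⟩
  [("Problem & Motivation", dedupA b.pm),
   ("Key Contributions", dedupA b.kc),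
   ("Method Overview", dedupA b.mo),
   ("Experimental Setup", dedupA b.es),
   ("Results & Findings", dedupA b.rfi),
   ("Limitations", dedupA b.li),
   ("Future Work", dedupA b.fw),
   ("Conclusion", dedupA b.co)]

-- ===== PORT B =====
def orderB : List String :=
  ["Problem & Motivation", "Key Contributions", "Method Overview", "Experimental Setup",
   "Results & Findings", "Limitations", "Future Work", "Conclusion"]

def rulesB : List (List String × List String) :=
  [(kwContrib, ["Key Contributions", "Method Overview"]),
   (kwExp, ["Experimental Setup"]),
   (kwRes, ["Results & Findings"]),
   (kwLim, ["Limitations"]),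
   (kwFut, ["Future Work"]),
   (kwConc, ["Conclusion"])]

def targetsB (s : String) : List String :=
  let low := PySem.Str.lower s
  match rulesB.find? (fun r => r.1.any (fun k => PySem.Str.isIn k low)) with
  | some r => r.2
  | none => ["Problem & Motivation"]

-- dict of first representatives: stripped key -> first sentence; values in order
def firstOccB (vals : List String) : List String :=
  (vals.foldl (fun d v =>
      let key := PySem.Str.strip v
      if key != "" then d.setdefault key v else d)
    (PySem.Dict.empty : PySem.Dict String String)).values

def derive_deck_sections_py_alt (summary_sents : List String) : List (String × List String) :=
  let tagged := summary_sents.map (fun s => (s, targetsB s))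
  orderB.map (fun name =>
    (name, firstOccB (tagged.filterMap (fun p => if p.2.contains name then some p.1 else none))))

-- ===== PRECONDITION & SPEC =====
def Spec_derive_deck_sections_py (summary_sents : List String) (out : List (String × List String)) : Prop := out = derive_deck_sections_py_alt summary_sents
instance (summary_sents : List String) (out : List (String × List String)) : Decidable (Spec_derive_deck_sections_py summary_sents out) := by unfold Spec_derive_deck_sections_py; infer_instance

-- ===== CLAIM (what is proved, stated in full; the proofs are below) =====
def Claim_equal_derive_deck_sections_py : Prop := ∀ (summary_sents : List String), Dom_derive_deck_sections_py summary_sents → Spec_derive_deck_sections_py summary_sents (derive_deck_sections_py summary_sents)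

-- ===== LEMMAS AND PROOFS =====

-- the candidate list of a bucket, as B computes it
def candB (name : String) (ss : List String) : List String :=
  ss.filter (fun s => (targetsB s).contains name)

lemma cand_eq (name : String) (ss : List String) :
    (ss.map (fun s => (s, targetsB s))).filterMap
        (fun p => if p.2.contains name then some p.1 else none)
      = candB name ss := by
  induction ss with
  | nil => rfl
  | cons s ss ih =>
    simp only [List.map_cons, List.filterMap_cons, candB, List.filter_cons] at *
    split_ifs <;> simp_all

lemma targetsB_eq (s : String) :
    targetsB s =
      (if kwContrib.any (fun k => PySem.Str.isIn k (PySem.Str.lower s)) then ["Key Contributions", "Method Overview"]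
       else if kwExp.any (fun k => PySem.Str.isIn k (PySem.Str.lower s)) then ["Experimental Setup"]
       else if kwRes.any (fun k => PySem.Str.isIn k (PySem.Str.lower s)) then ["Results & Findings"]
       else if kwLim.any (fun k => PySem.Str.isIn k (PySem.Str.lower s)) then ["Limitations"]
       else if kwFut.any (fun k => PySem.Str.isIn k (PySem.Str.lower s)) then ["Future Work"]
       else if kwConc.any (fun k => PySem.Str.isIn k (PySem.Str.lower s)) then ["Conclusion"]
       else ["Problem & Motivation"]) := by
  unfold targetsB rulesB
  by_cases h1 : (kwContrib.any (fun k => PySem.Str.isIn k (PySem.Str.lower s))) = true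
  ·
    simp only [List.find?_cons, h1]
    simp
  ·
    by_cases h2 : (kwExp.any (fun k => PySem.Str.isIn k (PySem.Str.lower s))) = true
    ·
      rw [Bool.not_eq_true] at h1
      simp only [List.find?_cons, h1, h2]
      simp
    ·
      by_cases h3 : (kwRes.any (fun k => PySem.Str.isIn k (PySem.Str.lower s))) = true
      ·
        rw [Bool.not_eq_true] at h1 h2
        simp only [List.find?_cons, h1, h2, h3]
        simp
      ·
        by_cases h4 : (kwLim.any (fun k => PySem.Str.isIn k (PySem.Str.lower s))) = true
        ·
          rw [Bool.not_eq_true] at h1 h2 h3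
          simp only [List.find?_cons, h1, h2, h3, h4]
          simp
        ·
          by_cases h5 : (kwFut.any (fun k => PySem.Str.isIn k (PySem.Str.lower s))) = true
          ·
            rw [Bool.not_eq_true] at h1 h2 h3 h4
            simp only [List.find?_cons, h1, h2, h3, h4, h5]
            simp
          ·
            by_cases h6 : (kwConc.any (fun k => PySem.Str.isIn k (PySem.Str.lower s))) = true
            ·
              rw [Bool.not_eq_true] at h1 h2 h3 h4 h5
              simp only [List.find?_cons, h1, h2, h3, h4, h5, h6]
              simp
            ·
              rw [Bool.not_eq_true] at h1 h2 h3 h4 h5 h6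
              simp only [List.find?_cons, h1, h2, h3, h4, h5, h6]
              simp
lemma append_if_cons {a : Type} (l f : List a) (c : Prop) [Decidable c] (s : a) :
    (l ++ if c then [s] else []) ++ f = l ++ if c then s :: f else f := by
  split_ifs <;> simp

lemma stepA_eq (b : BucketsA) (s : String) :
    stepA b s =
      ⟨b.pm ++ (if (targetsB s).contains "Problem & Motivation" then [s] else []),
       b.kc ++ (if (targetsB s).contains "Key Contributions" then [s] else []),
       b.mo ++ (if (targetsB s).contains "Method Overview" then [s] else []),
       b.es ++ (if (targetsB s).contains "Experimental Setup" then [s] else []),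
       b.rfi ++ (if (targetsB s).contains "Results & Findings" then [s] else []),
       b.li ++ (if (targetsB s).contains "Limitations" then [s] else []),
       b.fw ++ (if (targetsB s).contains "Future Work" then [s] else []),
       b.co ++ (if (targetsB s).contains "Conclusion" then [s] else [])⟩ := by
  rw [targetsB_eq]
  simp only [stepA]
  by_cases h1 : (kwContrib.any (fun k => PySem.Str.isIn k (PySem.Str.lower s))) = true
  ·
    simp only [h1]
    simp
  ·
    by_cases h2 : (kwExp.any (fun k => PySem.Str.isIn k (PySem.Str.lower s))) = true
    ·
      rw [Bool.not_eq_true] at h1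
      simp only [h1, h2]
      simp
    ·
      by_cases h3 : (kwRes.any (fun k => PySem.Str.isIn k (PySem.Str.lower s))) = true
      ·
        rw [Bool.not_eq_true] at h1 h2
        simp only [h1, h2, h3]
        simp
      ·
        by_cases h4 : (kwLim.any (fun k => PySem.Str.isIn k (PySem.Str.lower s))) = true
        ·
          rw [Bool.not_eq_true] at h1 h2 h3
          simp only [h1, h2, h3, h4]
          simp
        ·
          by_cases h5 : (kwFut.any (fun k => PySem.Str.isIn k (PySem.Str.lower s))) = true
          ·
            rw [Bool.not_eq_true] at h1 h2 h3 h4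
            simp only [h1, h2, h3, h4, h5]
            simp
          ·
            by_cases h6 : (kwConc.any (fun k => PySem.Str.isIn k (PySem.Str.lower s))) = true
            ·
              rw [Bool.not_eq_true] at h1 h2 h3 h4 h5
              simp only [h1, h2, h3, h4, h5, h6]
              simp
            ·
              rw [Bool.not_eq_true] at h1 h2 h3 h4 h5 h6
              simp only [h1, h2, h3, h4, h5, h6]
              simp
lemma fold_fields (ss : List String) (b : BucketsA) :
    ss.foldl stepA b =
      ⟨b.pm ++ candB "Problem & Motivation" ss,
       b.kc ++ candB "Key Contributions" ss,
       b.mo ++ candB "Method Overview" ss,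
       b.es ++ candB "Experimental Setup" ss,
       b.rfi ++ candB "Results & Findings" ss,
       b.li ++ candB "Limitations" ss,
       b.fw ++ candB "Future Work" ss,
       b.co ++ candB "Conclusion" ss⟩ := by
  induction ss generalizing b with
  | nil => simp [candB]
  | cons s ss ih =>
    rw [List.foldl_cons, ih, stepA_eq]
    simp only [candB, List.filter_cons, append_if_cons]

-- seen-set characterisation for A's dedup loop
lemma dState_append (vals : List String) (s : String) :
    (vals ++ [s]).foldl dedupStepA (PySem.Set.empty, []) =
      dedupStepA (vals.foldl dedupStepA (PySem.Set.empty, [])) s := by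
  simp [List.foldl_append]

lemma seen_mem (vals : List String) : ∀ k : String,
    k ∈ (vals.foldl dedupStepA (PySem.Set.empty, [])).1 ↔
      (k ≠ "" ∧ ∃ w ∈ vals, PySem.Str.strip w = k) := by
  induction vals using List.reverseRecOn with
  | nil => intro k; simp [PySem.Set.empty]
  | append_singleton vals s ih =>
    intro k
    rw [dState_append]
    simp only [dedupStepA]
    split_ifs with h
    · rw [ih]
      constructor
      · rintro ⟨hk, w, hw, he⟩; exact ⟨hk, w, List.mem_append_left _ hw, he⟩
      · rintro ⟨hk, w, hw, he⟩
        rcases List.mem_append.mp hw with hw | hw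
        · exact ⟨hk, w, hw, he⟩
        · have hw' : w = s := by simpa using hw
          subst hw'
          rw [Bool.or_eq_true] at h
          rcases h with h1 | h1
          · have hempty : PySem.Str.strip w = "" := by simpa using h1
            rw [hempty] at he; exact absurd he.symm hk
          · have hmem := (PySem.Set.contains_iff _ _).mp h1
            rcases (ih _).mp hmem with ⟨hne, w', hw', he'⟩
            exact ⟨hk, w', hw', by rw [he', he]⟩
    · have h' : ¬ PySem.Str.strip s = "" ∧
          PySem.Str.strip s ∉ (vals.foldl dedupStepA (PySem.Set.empty, [])).1 := by
        simpa using h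
      rw [PySem.Set.mem_add, ih]
      constructor
      · rintro (⟨hk, w, hw, he⟩ | hk)
        · exact ⟨hk, w, List.mem_append_left _ hw, he⟩
        · exact ⟨hk ▸ h'.1, s, List.mem_append_right _ (by simp), hk.symm⟩
      · rintro ⟨hk, w, hw, he⟩
        rcases List.mem_append.mp hw with hw | hw
        · exact Or.inl ⟨hk, w, hw, he⟩
        · have hw' : w = s := by simpa using hw
          subst hw'
          exact Or.inr he.symm

-- proof helper: the representatives dict firstOccB builds
def repD (vals : List String) : PySem.Dict String String :=
  vals.foldl (fun d v =>
      let key := PySem.Str.strip v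
      if key != "" then d.setdefault key v else d)
    PySem.Dict.empty

lemma firstOccB_eq (vals : List String) : firstOccB vals = (repD vals).values := rfl

lemma repD_append (vals : List String) (s : String) :
    repD (vals ++ [s]) =
      (if (PySem.Str.strip s != "") = true then (repD vals).setdefault (PySem.Str.strip s) s
       else repD vals) := by
  simp [repD, List.foldl_append]

lemma repD_contains (vals : List String) : ∀ k : String,
    (repD vals).contains k = true ↔ (k ≠ "" ∧ ∃ w ∈ vals, PySem.Str.strip w = k) := by
  induction vals using List.reverseRecOn with
  | nil => intro k; simp [repD]
  | append_singleton vals s ih =>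
    intro k
    rw [repD_append]
    by_cases hs : PySem.Str.strip s = ""
    · rw [if_neg (by simp [hs])]
      rw [ih k]
      constructor
      · rintro ⟨hk, w, hw, he⟩; exact ⟨hk, w, List.mem_append_left _ hw, he⟩
      · rintro ⟨hk, w, hw, he⟩
        rcases List.mem_append.mp hw with hw | hw
        · exact ⟨hk, w, hw, he⟩
        · have hw' : w = s := by simpa using hw
          subst hw'; rw [hs] at he; exact absurd he.symm hk
    · have hcond : (PySem.Str.strip s != "") = true := by simpa using hs
      rw [if_pos hcond]
      by_cases hc : (repD vals).contains (PySem.Str.strip s) = true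
      · have hsd : (repD vals).setdefault (PySem.Str.strip s) s = repD vals := by
          simp [PySem.Dict.setdefault_of_contains, hc]
        rw [hsd, ih k]
        constructor
        · rintro ⟨hk, w, hw, he⟩; exact ⟨hk, w, List.mem_append_left _ hw, he⟩
        · rintro ⟨hk, w, hw, he⟩
          rcases List.mem_append.mp hw with hw | hw
          · exact ⟨hk, w, hw, he⟩
          · have hw' : w = s := by simpa using hw
            subst hw'
            rcases (ih _).mp hc with ⟨-, w', hw', he'⟩
            exact ⟨hk, w', hw', by rw [he', he]⟩
      · have hsd : (repD vals).setdefault (PySem.Str.strip s) s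
            = (repD vals).insert (PySem.Str.strip s) s := by
          rw [Bool.not_eq_true] at hc
          simp [PySem.Dict.setdefault_of_not_contains, hc]
        rw [hsd, PySem.Dict.contains_insert, Bool.or_eq_true, beq_iff_eq]
        constructor
        · rintro (h | h)
          · exact ⟨h ▸ hs, s, List.mem_append_right _ (by simp), h.symm⟩
          · rcases (ih k).mp h with ⟨hk, w, hw, he⟩
            exact ⟨hk, w, List.mem_append_left _ hw, he⟩
        · rintro ⟨hk, w, hw, he⟩
          rcases List.mem_append.mp hw with hw | hw
          · exact Or.inr ((ih k).mpr ⟨hk, w, hw, he⟩)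
          · have hw' : w = s := by simpa using hw
            subst hw'; exact Or.inl he.symm

lemma dedup_eq_firstOcc (vals : List String) : dedupA vals = firstOccB vals := by
  induction vals using List.reverseRecOn with
  | nil => rfl
  | append_singleton vals s ih =>
    rw [firstOccB_eq, repD_append]
    rw [firstOccB_eq] at ih
    unfold dedupA
    rw [dState_append]
    simp only [dedupStepA]
    by_cases hs : PySem.Str.strip s = ""
    · rw [if_pos (by rw [Bool.or_eq_true]; exact Or.inl (by simpa using hs)),
        if_neg (by simp [hs])]
      exact ih
    · have hcond : (PySem.Str.strip s != "") = true := by simpa using hs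
      rw [if_pos hcond]
      by_cases hc : ∃ w ∈ vals, PySem.Str.strip w = PySem.Str.strip s
      · have hmem : PySem.Str.strip s ∈ (vals.foldl dedupStepA (PySem.Set.empty, [])).1 :=
          (seen_mem vals _).mpr ⟨hs, hc⟩
        have hcd : (repD vals).contains (PySem.Str.strip s) = true :=
          (repD_contains vals _).mpr ⟨hs, hc⟩
        rw [if_pos (by
            rw [Bool.or_eq_true]
            exact Or.inr ((PySem.Set.contains_iff _ _).mpr hmem)),
          (by simp [PySem.Dict.setdefault_of_contains, hcd] :
            (repD vals).setdefault (PySem.Str.strip s) s = repD vals)]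
        exact ih
      · have hnm : PySem.Str.strip s ∉ (vals.foldl dedupStepA (PySem.Set.empty, [])).1 :=
          fun hm => hc ((seen_mem vals _).mp hm).2
        have hcd : (repD vals).contains (PySem.Str.strip s) = false := by
          rw [Bool.eq_false_iff]
          exact fun h => hc ((repD_contains vals _).mp h).2
        rw [if_neg (by
            simp only [Bool.or_eq_true, beq_iff_eq]
            rintro (h | h)
            · exact hs h
            · exact hnm ((PySem.Set.contains_iff _ _).mp h)),
          (by simp [PySem.Dict.setdefault_of_not_contains, hcd] :
            (repD vals).setdefault (PySem.Str.strip s) s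
              = (repD vals).insert (PySem.Str.strip s) s)]
        have hitems : ((repD vals).insert (PySem.Str.strip s) s).items
            = (repD vals).items ++ [(PySem.Str.strip s, s)] := by
          simp [PySem.Dict.items_insert_of_not_contains, hcd]
        simp only [PySem.Dict.values, hitems, List.map_append, List.map_cons, List.map_nil]
        show dedupA vals ++ [s] = (repD vals).values ++ [s]
        rw [ih]

-- ===== VERDICT (by name: the statement is the Claim_ definition above) =====
theorem derive_deck_sections_py_spec : Claim_equal_derive_deck_sections_py := by
  intro ss _
  show derive_deck_sections_py ss = derive_deck_sections_py_alt ss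
  simp only [derive_deck_sections_py, derive_deck_sections_py_alt, orderB, List.map_cons,
    List.map_nil, cand_eq, fold_fields, List.nil_append, dedup_eq_firstOcc]
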